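-- pv_equiv track=rewrite | github.com/Nastasia8/AaDS_1_184_2021 | y.c.3/y.c.3(2).py | clsdvig
-- ===== SOURCE A (Python) =====
-- def clsdvig(s, t, c):
--     if s==t:
--         return 0
--     else:
--         t*=2
--         p = 11
--         m = 1
--         sh = 0
--         for i in s[::-1]:
--             sh += ord(i) * m
--             m *= p
--             sh %= c
--             m %= c
--
--         m = 1
--         hash = 0
--         for i in t[:len(s)][::-1]:
--             hash += m * ord(i)
--             m *= p
--             hash %= c
--             m %= c
--
--         ht = 1
--         for i in range(len(s) - 1):
--             ht *= p
--             ht %= c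
--         for i in range(1, len(t) - len(s) + 1):
--             hn = ((hash % c - ord(t[i - 1]) * ht % c) * p % c + ord(t[i + len(s) - 1])) % c
--             if hn == sh:
--                 return i
--             hash = hn
--
--         return -1
-- ===== SOURCE B (Python) =====
-- def clsdvig(s, t, c):
--     if s == t:
--         return 0
--     t *= 2
--     m = len(s)
--     # prefix Horner hashes: pre[j] = polynomial hash of t[:j] mod c
--     pre = [0] * (len(t) + 1)
--     h = 0
--     for j, ch in enumerate(t):
--         h = (h * 11 + ord(ch)) % c
--         pre[j + 1] = h
--     pw = 1
--     for _ in range(m):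
--         pw = pw * 11 % c
--     sh = 0
--     for ch in s:
--         sh = (sh * 11 + ord(ch)) % c
--     for i in range(1, len(t) - m + 1):
--         if (pre[i + m] - pre[i] * pw) % c == sh:
--             return i
--     return -1
-- ===== Notes on version B (the rewrite author's own statement) =====
-- stated objective: alternative
-- what changed: Replaces A's rolling-hash update (subtract leading char times a precomputed power, multiply by p, add new char, carried window to window) with a table-then-scan shape: one pass builds a prefix array of Horner hashes of t, then each window hash is derived independently by the prefix difference pre[i+m] - pre[i]*11^m mod c; residues mod c are identical, so hash collisions are preserved.
-- intended difference: On an empty pattern s with non-empty t and c not dividing 10*ord(t[0]), A's rolling update degenerates (it rolls the char it just subtracted back in, yielding residue -10*ord(t[i-1]) instead of the empty window's hash 0) and returns -1 or an offset >= 2, while B's prefix difference gives the empty window hash 0 = hash('') and returns 1, the first matching shift, which is the intended hash-match answer. — e.g. on clsdvig("", "a", 7): A returns -1, B returns 1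
import Mathlib
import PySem

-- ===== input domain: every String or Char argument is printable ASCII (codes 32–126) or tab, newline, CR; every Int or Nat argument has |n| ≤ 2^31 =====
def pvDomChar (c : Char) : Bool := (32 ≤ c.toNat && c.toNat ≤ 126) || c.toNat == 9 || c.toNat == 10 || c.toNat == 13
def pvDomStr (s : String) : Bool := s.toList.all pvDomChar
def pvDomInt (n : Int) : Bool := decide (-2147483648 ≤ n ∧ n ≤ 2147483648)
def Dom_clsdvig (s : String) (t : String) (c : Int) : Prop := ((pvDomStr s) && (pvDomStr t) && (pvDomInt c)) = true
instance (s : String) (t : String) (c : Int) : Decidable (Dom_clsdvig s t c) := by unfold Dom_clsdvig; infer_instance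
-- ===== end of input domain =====

-- B replaces A's rolling-hash update with a direct per-window Horner hash recomputed for each
-- shift (same p = 11 and mod-c residues, so hash collisions are preserved); alternative
-- decomposition, not claimed faster.

-- ===== PORT A =====
-- ord(ch)
def pvOrd (ch : Char) : Int := (ch.toNat : Int)

-- loop body of A's first hash loop: sh += ord(i)*m; m *= p; sh %= c; m %= c
def aStep1 (c : Int) (st : Int × Int) (ch : Char) : Int × Int :=
  (PySem.Int.mod (st.1 + pvOrd ch * st.2) c, PySem.Int.mod (st.2 * 11) c)

-- loop body of A's second hash loop: hash += m * ord(i); m *= p; hash %= c; m %= c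
def aStep2 (c : Int) (st : Int × Int) (ch : Char) : Int × Int :=
  (PySem.Int.mod (st.1 + st.2 * pvOrd ch) c, PySem.Int.mod (st.2 * 11) c)

-- A's main rolling loop `for i in range(1, len(t) - len(s) + 1)`, fuel = number of remaining
-- iterations; the list indices i-1 and i+m-1 are provably in range at every call (i ≥ 1,
-- i+m ≤ len(tl)), so getD never takes its default.
def aScan (tl : List Char) (m : Nat) (c sh ht : Int) : Int → Nat → Nat → Int
  | _, _, 0 => -1
  | hash, i, fuel+1 =>
    let a := pvOrd (tl.getD (i-1) ' ')
    let b := pvOrd (tl.getD (i+m-1) ' ')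
    let hn := PySem.Int.mod (PySem.Int.mod ((PySem.Int.mod hash c - PySem.Int.mod (a * ht) c) * 11) c + b) c
    if hn == sh then (i : Int) else aScan tl m c sh ht hn (i+1) fuel

def clsdvig (s : String) (t : String) (c : Int) : Int :=
  if s.toList == t.toList then 0    -- s == t  (string equality = char-list equality)
  else
    let tl := t.toList ++ t.toList  -- t *= 2
    let sl := s.toList
    let sh := (sl.reverse.foldl (aStep1 c) (0, 1)).1          -- for i in s[::-1]
    let hash := ((tl.take sl.length).reverse.foldl (aStep2 c) (0, 1)).1  -- for i in t[:len(s)][::-1]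
    let ht := (List.range (sl.length - 1)).foldl (fun h _ => PySem.Int.mod (h * 11) c) 1
    aScan tl sl.length c sh ht hash 1 (tl.length - sl.length)

-- ===== PORT B =====
-- the Horner hash loop `h = (h * 11 + ord(ch)) % c` from 0 (used for sh)
def bHash (c : Int) (w : List Char) : Int :=
  w.foldl (fun r ch => PySem.Int.mod (r * 11 + pvOrd ch) c) 0

-- B's scan: window hash by prefix difference pre[i+m] - pre[i]*pw, one comparison per shift
def bScan (pre : List Int) (m : Nat) (c sh pw : Int) : Nat → Nat → Int
  | _, 0 => -1
  | i, fuel+1 =>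
    if PySem.Int.mod (pre.getD (i + m) 0 - pre.getD i 0 * pw) c == sh then (i : Int)
    else bScan pre m c sh pw (i + 1) fuel

def clsdvig_alt (s : String) (t : String) (c : Int) : Int :=
  if s.toList == t.toList then 0
  else
    let tl := t.toList ++ t.toList  -- t *= 2
    let m := s.toList.length
    -- pre[j] = hash(t[:j]) mod c, built in one accumulating pass (Python's pre-array loop)
    let pre := List.scanl (fun r ch => PySem.Int.mod (r * 11 + pvOrd ch) c) 0 tl
    let pw := (List.range m).foldl (fun x _ => PySem.Int.mod (x * 11) c) 1  -- pw = 11^m mod c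
    bScan pre m c (bHash c s.toList) pw 1 (tl.length - m)

-- ===== PRECONDITION & SPEC =====
-- Pre_ excludes c = 0 with s ≠ t, exactly where Python A raises ZeroDivisionError.
def Pre_clsdvig (s : String) (t : String) (c : Int) : Prop := s = t ∨ c ≠ 0
instance (s : String) (t : String) (c : Int) : Decidable (Pre_clsdvig s t c) := by
  unfold Pre_clsdvig; infer_instance
def pvWitness_clsdvig : String × String × Int := ("ab", "ba", 97)

-- On an empty pattern s with non-empty t and c not dividing 10*ord(t[0]), A's rolling update
-- degenerates (it rolls the char it just subtracted back in, yielding residue -10*ord(t[i-1])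
-- instead of the empty window's hash 0) and returns -1 or an offset ≥ 2, while B hashes the
-- empty window to 0 = hash('') and returns 1, the first matching shift, the intended answer.
def D_clsdvig (s : String) (t : String) (c : Int) : Prop :=
  s = "" ∧ t ≠ "" ∧ ¬ (PySem.Int.mod (10 * ((t.toList.headD ' ').toNat : Int)) c = 0)
instance (s : String) (t : String) (c : Int) : Decidable (D_clsdvig s t c) := by
  unfold D_clsdvig; infer_instance

def Spec_clsdvig (s : String) (t : String) (c : Int) (out : Int) : Prop :=
  ¬ D_clsdvig s t c → out = clsdvig_alt s t c
instance (s : String) (t : String) (c : Int) (out : Int) : Decidable (Spec_clsdvig s t c out) := by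
  unfold Spec_clsdvig; infer_instance

def pvDiffWitness_clsdvig : String × String × Int := ("", "a", 7)
def pvDiffWitnessOut_clsdvig : Int × Int := (-1, 1)

-- ===== CLAIM (what is proved, stated in full; the proofs are below) =====
def Claim_unchanged_clsdvig : Prop := ∀ (s : String) (t : String) (c : Int), Dom_clsdvig s t c → Pre_clsdvig s t c → Spec_clsdvig s t c (clsdvig s t c)
def Claim_changed_clsdvig : Prop := Dom_clsdvig (pvDiffWitness_clsdvig.1) (pvDiffWitness_clsdvig.2.1) (pvDiffWitness_clsdvig.2.2) ∧ Pre_clsdvig (pvDiffWitness_clsdvig.1) (pvDiffWitness_clsdvig.2.1) (pvDiffWitness_clsdvig.2.2) ∧ D_clsdvig (pvDiffWitness_clsdvig.1) (pvDiffWitness_clsdvig.2.1) (pvDiffWitness_clsdvig.2.2) ∧ clsdvig (pvDiffWitness_clsdvig.1) (pvDiffWitness_clsdvig.2.1) (pvDiffWitness_clsdvig.2.2) = pvDiffWitnessOut_clsdvig.1 ∧ clsdvig_alt (pvDiffWitness_clsdvig.1) (pvDiffWitness_clsdvig.2.1) (pvDiffWitness_clsdvig.2.2) = pvDiffWitnessOut_clsdvig.2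 ∧ pvDiffWitnessOut_clsdvig.1 ≠ pvDiffWitnessOut_clsdvig.2
def Claim_exact_clsdvig : Prop := ∀ (s : String) (t : String) (c : Int), Dom_clsdvig s t c → Pre_clsdvig s t c → D_clsdvig s t c → clsdvig s t c ≠ clsdvig_alt s t c

-- ===== LEMMAS AND PROOFS =====


-- mod is A's / B's only arithmetic: basic facts about Python's % (floor mod)

theorem pvMod_sub_dvd (a c : Int) : c ∣ PySem.Int.mod a c - a := by
  have h := PySem.Int.floordiv_mul_add_mod a c
  exact ⟨-(PySem.Int.floordiv a c), by linarith⟩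

theorem pvMod_congr {c : Int} (hc : c ≠ 0) {a b : Int} (h : c ∣ a - b) :
    PySem.Int.mod a c = PySem.Int.mod b c := by
  have d : c ∣ PySem.Int.mod a c - PySem.Int.mod b c := by
    have d1 := pvMod_sub_dvd a c
    have d2 := pvMod_sub_dvd b c
    have e : PySem.Int.mod a c - PySem.Int.mod b c
        = (PySem.Int.mod a c - a) - (PySem.Int.mod b c - b) + (a - b) := by ring
    rw [e]; exact dvd_add (dvd_sub d1 d2) h
  have hb : (PySem.Int.mod a c - PySem.Int.mod b c).natAbs < c.natAbs := by
    rcases lt_or_gt_of_ne hc with hneg | hpos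
    · have b1 := PySem.Int.mod_neg_bounds a hneg
      have b2 := PySem.Int.mod_neg_bounds b hneg
      omega
    · have b1 := PySem.Int.mod_nonneg a hpos
      have b2 := PySem.Int.mod_lt a hpos
      have b3 := PySem.Int.mod_nonneg b hpos
      have b4 := PySem.Int.mod_lt b hpos
      omega
  have := Int.eq_zero_of_dvd_of_natAbs_lt_natAbs d hb
  omega

theorem pvMod_zero (c : Int) : PySem.Int.mod 0 c = 0 :=
  (PySem.Int.mod_eq_zero_iff_dvd 0 c).mpr (dvd_zero c)

-- exact (un-modded) polynomial value of a char list: Horner from accumulator S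
def pvH (S : Int) (w : List Char) : Int := w.foldl (fun r ch => r * 11 + pvOrd ch) S
def pvPV (w : List Char) : Int := pvH 0 w
-- Σ_j ord(l_j)·11^j, the shape of A's reversed accumulation
def pvSum : List Char → Int
  | [] => 0
  | a :: l => pvOrd a + 11 * pvSum l

theorem pvH_cons (S : Int) (a : Char) (w : List Char) :
    pvH S (a :: w) = pvH (S * 11 + pvOrd a) w := rfl

theorem pvH_eq (w : List Char) : ∀ S : Int, pvH S w = S * 11 ^ w.length + pvPV w := by
  induction w with
  | nil => intro S; simp [pvH, pvPV]
  | cons a w ih =>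
    intro S
    rw [pvH_cons, ih]
    have h2 : pvPV (a :: w) = pvOrd a * 11 ^ w.length + pvPV w := by
      show pvH 0 (a :: w) = _
      rw [pvH_cons, ih]; ring
    rw [h2]; simp [List.length_cons]; ring

theorem pvPV_append_singleton (w : List Char) (b : Char) :
    pvPV (w ++ [b]) = 11 * pvPV w + pvOrd b := by
  show pvH 0 (w ++ [b]) = _
  unfold pvH
  rw [List.foldl_append]
  show pvH 0 w * 11 + pvOrd b = _
  show pvH 0 w * 11 + pvOrd b = 11 * pvH 0 w + pvOrd b
  ring

theorem pvPV_append (u v : List Char) : pvPV (u ++ v) = pvPV u * 11 ^ v.length + pvPV v := by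
  show pvH 0 (u ++ v) = _
  unfold pvH
  rw [List.foldl_append]
  exact pvH_eq v (pvH 0 u)

theorem pvSum_append_singleton (l : List Char) (a : Char) :
    pvSum (l ++ [a]) = pvSum l + 11 ^ l.length * pvOrd a := by
  induction l with
  | nil => simp [pvSum]
  | cons x l ih => simp [pvSum, ih]; ring

theorem pvSum_reverse (w : List Char) : pvSum w.reverse = pvPV w := by
  induction w with
  | nil => rfl
  | cons a w ih =>
    rw [List.reverse_cons, pvSum_append_singleton, ih, List.length_reverse]
    show _ = pvH 0 (a :: w)
    rw [pvH_cons, pvH_eq]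
    ring

-- A's hash loops: invariant of the (sh, m) state
theorem aFold1_eq {c : Int} (hc : c ≠ 0) :
    ∀ (l : List Char) (S M sh m : Int), sh = PySem.Int.mod S c → c ∣ m - M →
      (l.foldl (aStep1 c) (sh, m)).1 = PySem.Int.mod (S + M * pvSum l) c := by
  intro l
  induction l with
  | nil =>
    intro S M sh m hsh _
    simpa [pvSum] using hsh
  | cons a l ih =>
    intro S M sh m hsh hm
    rw [List.foldl_cons]
    have step : aStep1 c (sh, m) a
        = (PySem.Int.mod (sh + pvOrd a * m) c, PySem.Int.mod (m * 11) c) := rfl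
    rw [step]
    have := ih (S + pvOrd a * M) (11 * M)
      (PySem.Int.mod (sh + pvOrd a * m) c) (PySem.Int.mod (m * 11) c)
      (by
        apply pvMod_congr hc
        have e : sh + pvOrd a * m - (S + pvOrd a * M)
            = (sh - S) + pvOrd a * (m - M) := by ring
        rw [e]
        exact dvd_add (by rw [hsh]; exact pvMod_sub_dvd S c) (Dvd.dvd.mul_left hm (pvOrd a)))
      (by
        have e : PySem.Int.mod (m * 11) c - 11 * M
            = (PySem.Int.mod (m * 11) c - m * 11) + 11 * (m - M) := by ring
        rw [e]
        exact dvd_add (pvMod_sub_dvd (m * 11) c) (Dvd.dvd.mul_left hm 11))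
    rw [this]
    apply pvMod_congr hc
    have e : S + pvOrd a * M + 11 * M * pvSum l - (S + M * pvSum (a :: l)) = 0 := by
      simp [pvSum]; ring
    rw [e]
    exact dvd_zero c

-- B's hash helper computes the canonical residue of the exact polynomial value
theorem bFold_eq {c : Int} (hc : c ≠ 0) :
    ∀ (w : List Char) (r S : Int), r = PySem.Int.mod S c →
      w.foldl (fun r ch => PySem.Int.mod (r * 11 + pvOrd ch) c) r = PySem.Int.mod (pvH S w) c := by
  intro w
  induction w with
  | nil => intro r S hr; simpa [pvH] using hr
  | cons a w ih =>
    intro r S hr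
    rw [List.foldl_cons, pvH_cons]
    apply ih
    apply pvMod_congr hc
    have e : r * 11 + pvOrd a - (S * 11 + pvOrd a) = (r - S) * 11 := by ring
    rw [e]
    apply Dvd.dvd.mul_right
    rw [hr]; exact pvMod_sub_dvd S c

theorem bHash_eq {c : Int} (hc : c ≠ 0) (w : List Char) :
    bHash c w = PySem.Int.mod (pvPV w) c :=
  bFold_eq hc w 0 0 (pvMod_zero c).symm


theorem aStep2_eq_aStep1 (c : Int) : aStep2 c = aStep1 c := by
  funext st ch; simp [aStep1, aStep2, mul_comm]

-- A's power loop ht: residue invariant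
theorem htFold_dvd {c : Int} :
    ∀ (n : Nat) (h : Int),
      c ∣ (List.range n).foldl (fun x _ => PySem.Int.mod (x * 11) c) h - h * 11 ^ n := by
  intro n
  induction n with
  | zero => intro h; simp
  | succ n ih =>
    intro h
    rw [List.range_succ, List.foldl_append]
    simp only [List.foldl_cons, List.foldl_nil]
    have d1 := pvMod_sub_dvd ((List.range n).foldl (fun x _ => PySem.Int.mod (x * 11) c) h * 11) c
    have d2 := ih h
    have e : PySem.Int.mod ((List.range n).foldl (fun x _ => PySem.Int.mod (x * 11) c) h * 11) c - h * 11 ^ (n + 1)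
        = (PySem.Int.mod ((List.range n).foldl (fun x _ => PySem.Int.mod (x * 11) c) h * 11) c
            - (List.range n).foldl (fun x _ => PySem.Int.mod (x * 11) c) h * 11)
          + ((List.range n).foldl (fun x _ => PySem.Int.mod (x * 11) c) h - h * 11 ^ n) * 11 := by ring
    rw [e]
    exact dvd_add d1 (Dvd.dvd.mul_right d2 11)

-- the heart: A's rolling scan equals B's recompute-each-window scan
theorem scan_eq {tl : List Char} {pre : List Int} {m : Nat} {c sh ht pw : Int} (hc : c ≠ 0)
    (hm : 1 ≤ m) (hht : c ∣ ht - 11 ^ (m - 1)) (hpw : c ∣ pw - 11 ^ m)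
    (hpre : ∀ j, j ≤ tl.length → pre.getD j 0 = PySem.Int.mod (pvPV (tl.take j)) c) :
    ∀ (fuel i : Nat) (hash : Int), 1 ≤ i → i + m + fuel = tl.length + 1 →
      hash = PySem.Int.mod (pvPV ((tl.drop (i - 1)).take m)) c →
      aScan tl m c sh ht hash i fuel = bScan pre m c sh pw i fuel := by
  intro fuel
  induction fuel with
  | zero => intro i hash _ _ _; rfl
  | succ fuel ih =>
    intro i hash hi hlen hhash
    obtain ⟨i', rfl⟩ : ∃ i', i = i' + 1 := ⟨i - 1, by omega⟩
    obtain ⟨m', rfl⟩ : ∃ m', m = m' + 1 := ⟨m - 1, by omega⟩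
    have hi1 : i' < tl.length := by omega
    have hend : i' + 1 + m' < tl.length := by omega
    have hulen : ((tl.drop (i' + 1)).take m').length = m' := by
      simp [List.length_take, List.length_drop]; omega
    have key1 : (tl.drop (i' + 1 - 1)).take (m' + 1) = tl[i'] :: (tl.drop (i' + 1)).take m' := by
      simp only [Nat.add_sub_cancel]
      rw [List.drop_eq_getElem_cons hi1, List.take_succ_cons]
    have key2 : (tl.drop (i' + 1)).take (m' + 1)
        = (tl.drop (i' + 1)).take m' ++ [tl[i' + 1 + m']] := by
      rw [List.take_succ_eq_append_getElem (by simp [List.length_drop]; omega)]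
      congr 2
      simp [List.getElem_drop]
    have g1 : tl.getD (i' + 1 - 1) ' ' = tl[i'] := by
      simp only [Nat.add_sub_cancel]; exact List.getD_eq_getElem tl ' ' hi1
    have g2 : tl.getD (i' + 1 + (m' + 1) - 1) ' ' = tl[i' + 1 + m'] := by
      have e : i' + 1 + (m' + 1) - 1 = i' + 1 + m' := by omega
      rw [e]; exact List.getD_eq_getElem tl ' ' hend
    have hP : pvPV ((tl.drop (i' + 1 - 1)).take (m' + 1))
        = pvOrd tl[i'] * 11 ^ m' + pvPV ((tl.drop (i' + 1)).take m') := by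
      rw [key1]
      show pvH 0 _ = _
      rw [pvH_cons, pvH_eq, hulen]
      ring
    have hQ : pvPV ((tl.drop (i' + 1)).take (m' + 1))
        = 11 * pvPV ((tl.drop (i' + 1)).take m') + pvOrd tl[i' + 1 + m'] := by
      rw [key2, pvPV_append_singleton]
    have hht' : c ∣ ht - 11 ^ m' := by simpa using hht
    simp only [aScan, bScan, g1, g2]
    have hhn : PySem.Int.mod (PySem.Int.mod ((PySem.Int.mod hash c - PySem.Int.mod (pvOrd tl[i'] * ht) c) * 11) c + pvOrd tl[i' + 1 + m']) c
        = PySem.Int.mod (pvPV ((tl.drop (i' + 1)).take (m' + 1))) c := by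
      apply pvMod_congr hc
      rw [hQ]
      have dH : c ∣ PySem.Int.mod hash c - pvPV ((tl.drop (i' + 1 - 1)).take (m' + 1)) := by
        rw [hhash]
        have d1 := pvMod_sub_dvd (PySem.Int.mod (pvPV ((tl.drop (i' + 1 - 1)).take (m' + 1))) c) c
        have d2 := pvMod_sub_dvd (pvPV ((tl.drop (i' + 1 - 1)).take (m' + 1))) c
        have e : PySem.Int.mod (PySem.Int.mod (pvPV ((tl.drop (i' + 1 - 1)).take (m' + 1))) c) c
              - pvPV ((tl.drop (i' + 1 - 1)).take (m' + 1))
            = (PySem.Int.mod (PySem.Int.mod (pvPV ((tl.drop (i' + 1 - 1)).take (m' + 1))) c) c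
                - PySem.Int.mod (pvPV ((tl.drop (i' + 1 - 1)).take (m' + 1))) c)
              + (PySem.Int.mod (pvPV ((tl.drop (i' + 1 - 1)).take (m' + 1))) c
                - pvPV ((tl.drop (i' + 1 - 1)).take (m' + 1))) := by ring
        rw [e]; exact dvd_add d1 d2
      have dA : c ∣ PySem.Int.mod (pvOrd tl[i'] * ht) c - pvOrd tl[i'] * 11 ^ m' := by
        have d1 := pvMod_sub_dvd (pvOrd tl[i'] * ht) c
        have d2 : c ∣ pvOrd tl[i'] * (ht - 11 ^ m') := Dvd.dvd.mul_left hht' (pvOrd tl[i'])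
        have e : PySem.Int.mod (pvOrd tl[i'] * ht) c - pvOrd tl[i'] * 11 ^ m'
            = (PySem.Int.mod (pvOrd tl[i'] * ht) c - pvOrd tl[i'] * ht)
              + pvOrd tl[i'] * (ht - 11 ^ m') := by ring
        rw [e]; exact dvd_add d1 d2
      have dM := pvMod_sub_dvd ((PySem.Int.mod hash c - PySem.Int.mod (pvOrd tl[i'] * ht) c) * 11) c
      have dX : c ∣ (PySem.Int.mod hash c - PySem.Int.mod (pvOrd tl[i'] * ht) c) * 11
          - (pvPV ((tl.drop (i' + 1 - 1)).take (m' + 1)) - pvOrd tl[i'] * 11 ^ m') * 11 := by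
        have d := Dvd.dvd.mul_right (dvd_sub dH dA) 11
        have e : (PySem.Int.mod hash c - pvPV ((tl.drop (i' + 1 - 1)).take (m' + 1))
              - (PySem.Int.mod (pvOrd tl[i'] * ht) c - pvOrd tl[i'] * 11 ^ m')) * 11
            = (PySem.Int.mod hash c - PySem.Int.mod (pvOrd tl[i'] * ht) c) * 11
              - (pvPV ((tl.drop (i' + 1 - 1)).take (m' + 1)) - pvOrd tl[i'] * 11 ^ m') * 11 := by
          ring
        rwa [e] at d
      have hz : (pvPV ((tl.drop (i' + 1 - 1)).take (m' + 1)) - pvOrd tl[i'] * 11 ^ m') * 11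
          - 11 * pvPV ((tl.drop (i' + 1)).take m') = 0 := by
        rw [hP]; ring
      have e : (PySem.Int.mod ((PySem.Int.mod hash c - PySem.Int.mod (pvOrd tl[i'] * ht) c) * 11) c + pvOrd tl[i' + 1 + m'])
          - (11 * pvPV ((tl.drop (i' + 1)).take m') + pvOrd tl[i' + 1 + m'])
          = (PySem.Int.mod ((PySem.Int.mod hash c - PySem.Int.mod (pvOrd tl[i'] * ht) c) * 11) c
              - (PySem.Int.mod hash c - PySem.Int.mod (pvOrd tl[i'] * ht) c) * 11)
            + ((PySem.Int.mod hash c - PySem.Int.mod (pvOrd tl[i'] * ht) c) * 11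
              - (pvPV ((tl.drop (i' + 1 - 1)).take (m' + 1)) - pvOrd tl[i'] * 11 ^ m') * 11)
            + ((pvPV ((tl.drop (i' + 1 - 1)).take (m' + 1)) - pvOrd tl[i'] * 11 ^ m') * 11
              - 11 * pvPV ((tl.drop (i' + 1)).take m')) := by ring
      rw [e, hz]
      exact dvd_add (dvd_add dM dX) (dvd_zero c)
    have hb : PySem.Int.mod (pre.getD (i' + 1 + (m' + 1)) 0 - pre.getD (i' + 1) 0 * pw) c
        = PySem.Int.mod (pvPV ((tl.drop (i' + 1)).take (m' + 1))) c := by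
      rw [hpre (i' + 1 + (m' + 1)) (by omega), hpre (i' + 1) (by omega)]
      apply pvMod_congr hc
      have hsplit : pvPV (tl.take (i' + 1 + (m' + 1)))
          = pvPV (tl.take (i' + 1)) * 11 ^ (m' + 1) + pvPV ((tl.drop (i' + 1)).take (m' + 1)) := by
        rw [List.take_add, pvPV_append]
        congr 2
        simp [List.length_take, List.length_drop]
        omega
      have d1 := pvMod_sub_dvd (pvPV (tl.take (i' + 1 + (m' + 1)))) c
      have d2 := pvMod_sub_dvd (pvPV (tl.take (i' + 1))) c
      have d3 : c ∣ PySem.Int.mod (pvPV (tl.take (i' + 1))) c * (pw - 11 ^ (m' + 1)) :=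
        Dvd.dvd.mul_left hpw _
      have e : PySem.Int.mod (pvPV (tl.take (i' + 1 + (m' + 1)))) c
            - PySem.Int.mod (pvPV (tl.take (i' + 1))) c * pw
            - pvPV ((tl.drop (i' + 1)).take (m' + 1))
          = (PySem.Int.mod (pvPV (tl.take (i' + 1 + (m' + 1)))) c - pvPV (tl.take (i' + 1 + (m' + 1))))
            - (PySem.Int.mod (pvPV (tl.take (i' + 1))) c - pvPV (tl.take (i' + 1))) * 11 ^ (m' + 1)
            - PySem.Int.mod (pvPV (tl.take (i' + 1))) c * (pw - 11 ^ (m' + 1))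
            + (pvPV (tl.take (i' + 1 + (m' + 1)))
              - pvPV (tl.take (i' + 1)) * 11 ^ (m' + 1)
              - pvPV ((tl.drop (i' + 1)).take (m' + 1))) := by ring
      have hz : pvPV (tl.take (i' + 1 + (m' + 1)))
            - pvPV (tl.take (i' + 1)) * 11 ^ (m' + 1)
            - pvPV ((tl.drop (i' + 1)).take (m' + 1)) = 0 := by
        rw [hsplit]; ring
      rw [e, hz]
      exact dvd_add (dvd_sub (dvd_sub d1 (Dvd.dvd.mul_right d2 _)) d3) (dvd_zero c)
    rw [hhn, hb]
    by_cases hcond : PySem.Int.mod (pvPV ((tl.drop (i' + 1)).take (m' + 1))) c = sh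
    · simp [hcond]
    · simp only [beq_iff_eq, hcond, if_false]
      apply ih
      · omega
      · omega
      · simp only [Nat.add_sub_cancel]


-- the degenerate first rolling step for an empty pattern: its value is ≡ -10·ord(t[0]) (mod c)
theorem empty_step_dvd (c a : Int) :
    c ∣ (PySem.Int.mod ((PySem.Int.mod 0 c - PySem.Int.mod (a * 1) c) * 11) c + a) + 10 * a := by
  have d1 := pvMod_sub_dvd ((PySem.Int.mod 0 c - PySem.Int.mod (a * 1) c) * 11) c
  have d0 := pvMod_sub_dvd 0 c
  have d2 := pvMod_sub_dvd (a * 1) c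
  have e : (PySem.Int.mod ((PySem.Int.mod 0 c - PySem.Int.mod (a * 1) c) * 11) c + a) + 10 * a
      = (PySem.Int.mod ((PySem.Int.mod 0 c - PySem.Int.mod (a * 1) c) * 11) c
          - (PySem.Int.mod 0 c - PySem.Int.mod (a * 1) c) * 11)
        + 11 * (PySem.Int.mod 0 c - 0) + (-11) * (PySem.Int.mod (a * 1) c - a * 1) := by ring
  rw [e]
  exact dvd_add (dvd_add d1 (Dvd.dvd.mul_left d0 11)) (Dvd.dvd.mul_left d2 (-11))

-- for an empty pattern B always reports shift 1 (the empty window hashes to hash('') = 0)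
theorem alt_empty_one {t : String} (c : Int) (ch : Char) (r : List Char)
    (htl : t.toList = ch :: r) : clsdvig_alt "" t c = 1 := by
  simp [clsdvig_alt, htl, bScan, bHash, pvMod_zero]

-- A's scan never returns 1 once the scan position has passed 1
theorem aScan_ne_one {tl : List Char} {m : Nat} {c sh ht : Int} :
    ∀ (fuel i : Nat) (hash : Int), 2 ≤ i → aScan tl m c sh ht hash i fuel ≠ 1 := by
  intro fuel
  induction fuel with
  | zero => intro i hash _; simp [aScan]
  | succ fuel ih =>
    intro i hash hi
    simp only [aScan]
    split
    · intro h
      have : i = 1 := by exact_mod_cast h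
      omega
    · exact ih (i + 1) _ (by omega)

-- ===== VERDICT (by name: the statement is the Claim_ definition above) =====
theorem clsdvig_spec : Claim_unchanged_clsdvig := by
  intro s t c _ hpre hnd
  show clsdvig s t c = clsdvig_alt s t c
  by_cases hst : s.toList = t.toList
  · simp [clsdvig, clsdvig_alt, hst]
  · have hc : c ≠ 0 := by
      rcases hpre with h | h
      · exact absurd (by rw [h]) hst
      · exact h
    have hbeq : (s.toList == t.toList) = false := by simpa using hst
    by_cases hm0 : s.toList.length = 0
    · -- empty pattern: ¬D forces c ∣ 10·ord(t[0]); both sides return 1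
      have hsl : s.toList = [] := List.length_eq_zero_iff.mp hm0
      have hs0 : s = "" := String.toList_eq_nil_iff.mp hsl
      have htnil : t.toList ≠ [] := by rw [← hsl]; exact Ne.symm hst
      obtain ⟨ch, r, htl⟩ := List.exists_cons_of_ne_nil htnil
      have ht0 : t ≠ "" := by
        intro h; rw [h] at htl; simp at htl
      have hR : PySem.Int.mod (10 * ((t.toList.headD ' ').toNat : Int)) c = 0 := by
        by_contra hR
        exact hnd ⟨hs0, ht0, hR⟩
      rw [htl] at hR
      simp only [List.headD_cons] at hR
      have hdvd : c ∣ 10 * ((ch.toNat : Int)) := (PySem.Int.mod_eq_zero_iff_dvd _ c).mp hR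
      subst hs0
      rw [alt_empty_one c ch r htl]
      simp only [clsdvig, hsl, htl]
      simp only [List.reverse_nil, List.foldl_nil, List.length_nil, List.take_zero,
        Nat.zero_sub, List.range_zero, Nat.sub_zero]
      simp only [List.cons_append, List.length_cons, aScan]
      have hgd : ((ch :: (r ++ ch :: r)).getD (1 - 1) ' ') = ch := by simp
      rw [hgd]
      have hz : PySem.Int.mod ((PySem.Int.mod ((PySem.Int.mod (0 : Int) c - PySem.Int.mod (pvOrd ch) c) * 11) c + pvOrd ch)) c = 0 := by
        apply (PySem.Int.mod_eq_zero_iff_dvd _ c).mpr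
        have d := empty_step_dvd c (pvOrd ch)
        rw [mul_one] at d
        have e : PySem.Int.mod ((PySem.Int.mod (0 : Int) c - PySem.Int.mod (pvOrd ch) c) * 11) c + pvOrd ch
            = ((PySem.Int.mod ((PySem.Int.mod (0 : Int) c - PySem.Int.mod (pvOrd ch) c) * 11) c + pvOrd ch) + 10 * pvOrd ch)
              - (10 * pvOrd ch) := by ring
        rw [e]
        exact dvd_sub d (by simpa [pvOrd] using hdvd)
      simp [hz]
    · -- non-empty pattern: both scans compare against the canonical window residues
      have hm : 1 ≤ s.toList.length := by omega
      simp only [clsdvig, clsdvig_alt, hbeq, Bool.false_eq_true, if_false]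
      have e_sh : ((s.toList.reverse).foldl (aStep1 c) (0, 1)).1 = PySem.Int.mod (pvPV s.toList) c := by
        rw [aFold1_eq hc s.toList.reverse 0 1 0 1 (pvMod_zero c).symm (by simp)]
        apply pvMod_congr hc
        rw [pvSum_reverse]
        simp
      have e_hash : (((t.toList ++ t.toList).take s.toList.length).reverse.foldl (aStep2 c) (0, 1)).1
          = PySem.Int.mod (pvPV ((t.toList ++ t.toList).take s.toList.length)) c := by
        rw [aStep2_eq_aStep1]
        rw [aFold1_eq hc _ 0 1 0 1 (pvMod_zero c).symm (by simp)]
        apply pvMod_congr hc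
        rw [pvSum_reverse]
        simp
      have e_bsh : bHash c s.toList = PySem.Int.mod (pvPV s.toList) c := bHash_eq hc _
      rw [e_sh, e_hash, e_bsh]
      have hht : c ∣ (List.range (s.toList.length - 1)).foldl (fun h _ => PySem.Int.mod (h * 11) c) 1
          - 11 ^ (s.toList.length - 1) := by
        have := htFold_dvd (c := c) (s.toList.length - 1) 1
        simpa using this
      have hpw : c ∣ (List.range s.toList.length).foldl (fun x _ => PySem.Int.mod (x * 11) c) 1
          - 11 ^ s.toList.length := by
        simpa using htFold_dvd (c := c) s.toList.length 1
      have hpre : ∀ j, j ≤ (t.toList ++ t.toList).length →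
          (List.scanl (fun r ch => PySem.Int.mod (r * 11 + pvOrd ch) c) 0 (t.toList ++ t.toList)).getD j 0
            = PySem.Int.mod (pvPV ((t.toList ++ t.toList).take j)) c := by
        intro j hj
        have hlt : j < (List.scanl (fun r ch => PySem.Int.mod (r * 11 + pvOrd ch) c) 0 (t.toList ++ t.toList)).length := by
          rw [List.length_scanl]; omega
        rw [List.getD_eq_getElem _ _ hlt, List.getElem_scanl hlt]
        exact bHash_eq hc _
      by_cases hml : s.toList.length ≤ (t.toList ++ t.toList).length
      · exact scan_eq hc hm hht hpw hpre ((t.toList ++ t.toList).length - s.toList.length) 1 _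
          (le_refl 1) (by omega) (by simp)
      · have hz : (t.toList ++ t.toList).length - s.toList.length = 0 := by omega
        rw [hz]
        rfl
theorem clsdvig_changed : Claim_changed_clsdvig := by unfold Claim_changed_clsdvig; decide
theorem clsdvig_tight : Claim_exact_clsdvig := by
  intro s t c _ hpre hd
  obtain ⟨hs0, ht0, hR⟩ := hd
  have htnil : t.toList ≠ [] := by
    intro h; exact ht0 (String.toList_eq_nil_iff.mp h)
  obtain ⟨ch, r, htl⟩ := List.exists_cons_of_ne_nil htnil
  have hc : c ≠ 0 := by
    rcases hpre with h | h
    · exact absurd (h.symm.trans hs0) ht0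
    · exact h
  subst hs0
  rw [htl] at hR
  simp only [List.headD_cons] at hR
  rw [alt_empty_one c ch r htl]
  have hsl : ("" : String).toList = [] := rfl
  have hbeq : (("" : String).toList == t.toList) = false := by simp [htl]
  simp only [clsdvig, hsl, htl]
  simp only [List.reverse_nil, List.foldl_nil, List.length_nil, List.take_zero,
    Nat.zero_sub, List.range_zero, Nat.sub_zero]
  simp only [List.cons_append, List.length_cons, aScan]
  have hgd : ((ch :: (r ++ ch :: r)).getD (1 - 1) ' ') = ch := by simp
  rw [hgd]
  simp only [beq_iff_eq]
  rw [if_neg (by simp : ¬ ([] : List Char) = ch :: r)]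
  have hnz : PySem.Int.mod ((PySem.Int.mod ((PySem.Int.mod (0 : Int) c - PySem.Int.mod (pvOrd ch * 1) c) * 11) c + pvOrd ch)) c ≠ 0 := by
    intro hz
    apply hR
    apply (PySem.Int.mod_eq_zero_iff_dvd _ c).mpr
    have hE := (PySem.Int.mod_eq_zero_iff_dvd _ c).mp hz
    have d := empty_step_dvd c (pvOrd ch)
    have e : (10 : Int) * ((ch.toNat : Int))
        = ((PySem.Int.mod ((PySem.Int.mod (0 : Int) c - PySem.Int.mod (pvOrd ch * 1) c) * 11) c + pvOrd ch) + 10 * pvOrd ch)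
          - (PySem.Int.mod ((PySem.Int.mod (0 : Int) c - PySem.Int.mod (pvOrd ch * 1) c) * 11) c + pvOrd ch) := by
      simp [pvOrd]
    rw [e]
    exact dvd_sub d hE
  rw [if_neg hnz]
  exact aScan_ne_one _ (1 + 1) _ (by omega)
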